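-- pv_equiv track=rewrite | github.com/zhiyaol/deltakit | deltakit-circuit/src/deltakit_circuit/_parse_stim.py | group_targets
-- ===== SOURCE A (Python) =====
-- from collections import Counter
-- from typing import (
--     Hashable,
--     Iterable,
--     List,
--     Mapping,
--     Sequence,
--     Set,
--     Type,
--     TypeVar,
--     Union,
--     cast,
-- )
--
-- T = TypeVar("T", bound=Hashable)  # pylint: disable=invalid-name
--
-- def group_targets(targets: Iterable[T]) -> List[Set[T]]:
--     """Group an iterable of qubit indices into overlapping sets of duplicate
--     elements. It does not preserve order and puts items into the "earliest"
--     available set.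
--
--     Examples
--     --------
--     [0, 1, 2, 3, 4] -> [{0, 1, 2, 3, 4}]
--     [0, 1, 2, 0, 2] -> [{0, 1, 2}, {0, 2}]
--     [0, 1, 2, 0, 2, 2] -> [{0, 1, 2}, {0, 2}, {2}]
--     [0, 1, 2, 0, 1, 0, 1, 2] -> [{0, 1, 2}, {0, 1, 2}, {0, 1}]
--
--     Parameters
--     ----------
--     targets : Iterable[T]
--         An iterable elements, some of which may be duplicated.
--
--     Returns
--     -------
--     List[Set[T]]
--         A list of overlapping sets separating duplicate elements.
--     """
--     target_counts = Counter(targets)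
--     number_of_groups = max(target_counts.values())
--     grouped_targets: List[Set[T]] = [set() for _ in range(number_of_groups)]
--     for target, target_count in target_counts.items():
--         for group in grouped_targets[0:target_count]:
--             group.add(target)
--     return grouped_targets
-- ===== SOURCE B (Python) =====
-- from collections import Counter
--
--
-- def group_targets(targets):
--     counts = Counter(targets)
--     number_of_groups = max(counts.values())
--     return [{t for t, c in counts.items() if c > i} for i in range(number_of_groups)]
-- ===== Notes on version B (the rewrite author's own statement) =====
-- stated objective: simpler
-- what changed: B constructs each group directly by its index (the set of targets whose count exceeds the index) in one comprehension, instead of pre-allocating mutable sets and distributing every target into a prefix of the group list.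
import Mathlib
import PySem

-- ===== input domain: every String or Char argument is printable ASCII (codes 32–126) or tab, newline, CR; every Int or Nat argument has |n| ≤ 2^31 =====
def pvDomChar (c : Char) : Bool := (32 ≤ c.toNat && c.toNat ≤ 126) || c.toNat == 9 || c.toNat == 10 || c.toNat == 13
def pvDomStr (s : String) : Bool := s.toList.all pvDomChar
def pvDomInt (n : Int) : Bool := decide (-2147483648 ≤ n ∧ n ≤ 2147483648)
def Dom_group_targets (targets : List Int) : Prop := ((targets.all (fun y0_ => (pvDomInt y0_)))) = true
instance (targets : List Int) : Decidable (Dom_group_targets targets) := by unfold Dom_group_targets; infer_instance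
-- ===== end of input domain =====

-- B builds each group directly by its index (targets with count > index) instead of distributing
-- each target into a prefix of pre-allocated mutable sets; objective: simpler. Both raise on [].


-- ===== PORT A =====
-- 'for group in grouped_targets[0:c]: group.add(target)' mutates the sets at indices < c in place;
-- ported as rebuilding the group list with those prefix positions updated (c ≤ number_of_groups always,
-- so the slice [0:c] is exactly the positions with index < c).
def groupStepA (gs : List (List Int)) (p : Int × Int) : List (List Int) :=
  gs.zipIdx.map (fun gi => if (gi.2 : Int) < p.2 then PySem.Set.add gi.1 p.1 else gi.1)

def group_targets (targets : List Int) : List (List Int) :=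
  let target_counts := PySem.Dict.counter targets
  match PySem.List.max? target_counts.values (fun v => v) with
  | none => []  -- unreachable under Pre_: max() of an empty sequence raises ValueError
  | some number_of_groups =>
    let grouped_targets : List (List Int) := List.replicate number_of_groups.toNat []
    target_counts.items.foldl groupStepA grouped_targets

-- ===== PORT B =====
def group_targets_alt (targets : List Int) : List (List Int) :=
  let counts := PySem.Dict.counter targets
  match PySem.List.max? counts.values (fun v => v) with
  | none => []  -- unreachable under Pre_: max() of an empty sequence raises ValueError
  | some number_of_groups =>
    (PySem.List.pyRange 0 number_of_groups 1).map (fun i =>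
      PySem.Set.ofList ((counts.items.filter (fun p => decide (i < p.2))).map Prod.fst))

-- ===== PRECONDITION & SPEC =====
-- Pre_ excludes exactly the empty list, on which A's (and B's) max() raises ValueError.
def Pre_group_targets (targets : List Int) : Prop := targets ≠ []
instance (targets : List Int) : Decidable (Pre_group_targets targets) := by unfold Pre_group_targets; infer_instance
def pvWitness_group_targets : List Int := [0, 1, 2, 0, 2]

def Spec_group_targets (targets : List Int) (out : List (List Int)) : Prop := out = group_targets_alt targets
instance (targets : List Int) (out : List (List Int)) : Decidable (Spec_group_targets targets out) := by unfold Spec_group_targets; infer_instance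

-- ===== CLAIM (what is proved, stated in full; the proofs are below) =====
def Claim_equal_group_targets : Prop := ∀ (targets : List Int), Dom_group_targets targets → Pre_group_targets targets → Spec_group_targets targets (group_targets targets)

-- ===== LEMMAS AND PROOFS =====

theorem length_groupStepA (gs : List (List Int)) (p : Int × Int) :
    (groupStepA gs p).length = gs.length := by
  simp [groupStepA]

theorem getElem_groupStepA (gs : List (List Int)) (p : Int × Int) (j : Nat) (h : j < gs.length) :
    (groupStepA gs p)[j]'(by simpa [groupStepA] using h) =
      if (j : Int) < p.2 then PySem.Set.add gs[j] p.1 else gs[j] := by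
  simp [groupStepA]

theorem length_foldl_groupStepA (l : List (Int × Int)) (gs : List (List Int)) :
    (l.foldl groupStepA gs).length = gs.length := by
  induction l generalizing gs with
  | nil => rfl
  | cons p l ih => simp [List.foldl_cons, ih, length_groupStepA]

theorem getElem_foldl_groupStepA (l : List (Int × Int)) (j : Nat) :
    ∀ (gs : List (List Int)) (h : j < gs.length),
    (l.foldl groupStepA gs)[j]'(by simpa [length_foldl_groupStepA] using h) =
      l.foldl (fun g p => if (j : Int) < p.2 then PySem.Set.add g p.1 else g) gs[j] := by
  induction l with
  | nil => intro gs h; rfl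
  | cons p l ih =>
    intro gs h
    simp only [List.foldl_cons]
    rw [ih (groupStepA gs p) (by simpa [length_groupStepA] using h),
        getElem_groupStepA gs p j h]

theorem filtered_fold_eq_ofList (l : List (Int × Int)) (j : Int) :
    l.foldl (fun g p => if j < p.2 then PySem.Set.add g p.1 else g) [] =
      PySem.Set.ofList ((l.filter (fun p => decide (j < p.2))).map Prod.fst) := by
  have h1 : PySem.Set.ofList ((l.filter (fun p => decide (j < p.2))).map Prod.fst) =
      ((l.filter (fun p => decide (j < p.2))).map Prod.fst).foldl PySem.Set.add PySem.Set.empty := rfl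
  rw [h1, List.foldl_map, List.foldl_filter]
  simp only [decide_eq_true_eq]
  rfl

theorem pyRange_zero_eq (m : Int) (hm : 0 ≤ m) :
    PySem.List.pyRange 0 m 1 = List.map (fun k : Nat => (k : Int)) (List.range m.toNat) := by
  obtain ⟨n, rfl⟩ := Int.eq_ofNat_of_zero_le hm
  simp only [Int.toNat_natCast]
  exact PySem.List.pyRange_zero_natCast n

theorem getElem_map_pyRange (f : Int → List Int) (m : Int) (hm : 0 ≤ m) (j : Nat)
    (hj : j < ((PySem.List.pyRange 0 m 1).map f).length) :
    ((PySem.List.pyRange 0 m 1).map f)[j] = f (j : Int) := by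
  simp only [pyRange_zero_eq m hm, List.getElem_map, List.getElem_range]

theorem length_map_pyRange (f : Int → List Int) (m : Int) (hm : 0 ≤ m) :
    ((PySem.List.pyRange 0 m 1).map f).length = m.toNat := by
  rw [pyRange_zero_eq m hm]
  simp

theorem max_counter_nonneg (targets : List Int) (m : Int)
    (hmax : PySem.List.max? (PySem.Dict.counter targets).values (fun v => v) = some m) :
    0 ≤ m := by
  have hmem : m ∈ (PySem.Dict.counter targets).values := PySem.List.max?_mem hmax
  have hv : (PySem.Dict.counter targets).values =
      (PySem.Dict.counter targets).items.map Prod.snd := rfl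
  rw [hv, PySem.Dict.items_counter] at hmem
  simp only [List.map_map, List.mem_map] at hmem
  obtain ⟨k, -, hk⟩ := hmem
  simp only [Function.comp] at hk
  omega

-- ===== VERDICT (by name: the statement is the Claim_ definition above) =====
theorem group_targets_spec : Claim_equal_group_targets := by
  intro targets _ _
  unfold Spec_group_targets group_targets group_targets_alt
  cases hmax : PySem.List.max? (PySem.Dict.counter targets).values (fun v => v) with
  | none => simp [hmax]
  | some m =>
    have hm : 0 ≤ m := max_counter_nonneg targets m hmax
    simp only [hmax]
    apply List.ext_getElem
    · rw [length_foldl_groupStepA, length_map_pyRange _ m hm, List.length_replicate]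
    · intro j hj1 hj2
      have hjlt : j < m.toNat := by
        simpa [length_foldl_groupStepA] using hj1
      rw [getElem_foldl_groupStepA _ j (List.replicate m.toNat []) (by simpa using hjlt),
        getElem_map_pyRange _ m hm j hj2, List.getElem_replicate]
      exact filtered_fold_eq_ofList _ _
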